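-- pv_equiv track=rewrite | github.com/ForestAdmin/agent-python | src/datasource_toolkit/forestadmin/datasource_toolkit/decorators/computed/utils/flattener.py | with_null_markers
-- ===== SOURCE A (Python) =====
-- from typing import Any, Dict, List, Optional, Union
--
-- _MARKER_NAME = "__nullMarker"
--
-- def with_null_markers(projection: List[str]) -> List[str]:
--     ret = projection[:]
--
--     for path in projection:
--         parts = path.split(":")
--         for i in range(1, len(parts)):
--             value = f"{':'.join(parts[0:i])}:{_MARKER_NAME}"
--             if value not in ret:
--                 ret.append(value)
--     return ret
-- ===== SOURCE B (Python) =====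
-- _MARKER_NAME = "__nullMarker"
--
-- def _path_markers(path):
--     # One character scan: at every ':' the prefix read so far (plus the
--     # marker) is a candidate.  No split/join, no nested index loop.
--     out = []
--     prefix = ""
--     for ch in path:
--         if ch == ":":
--             out.append(prefix + ":" + _MARKER_NAME)
--         prefix += ch
--     return out
--
-- def with_null_markers(projection):
--     candidates = [m for path in projection for m in _path_markers(path)]
--     # Staged pass: append candidates not seen before, tracking a seen-set.
--     seen = set(projection)
--     out = projection[:]
--     for m in candidates:
--         if m not in seen:
--             seen.add(m)
--             out.append(m)
--     return out
-- ===== Notes on version B (the rewrite author's own statement) =====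
-- stated objective: alternative
-- what changed: Replaces A's split/join over parts with a nested index range and a membership scan of the growing result by a single character scan per path that emits the running prefix at each colon, followed by a staged pass appending unseen candidates while maintaining a seen-set.
import Mathlib
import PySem

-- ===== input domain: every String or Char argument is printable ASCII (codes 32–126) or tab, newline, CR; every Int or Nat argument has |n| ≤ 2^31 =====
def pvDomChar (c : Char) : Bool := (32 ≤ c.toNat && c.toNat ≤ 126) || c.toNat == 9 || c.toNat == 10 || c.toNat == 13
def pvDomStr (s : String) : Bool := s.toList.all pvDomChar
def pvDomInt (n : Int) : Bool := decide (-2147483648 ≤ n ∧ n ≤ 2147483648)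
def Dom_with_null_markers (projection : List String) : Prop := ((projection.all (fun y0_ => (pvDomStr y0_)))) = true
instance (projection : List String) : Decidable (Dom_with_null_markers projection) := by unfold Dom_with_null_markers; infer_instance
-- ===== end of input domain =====

-- B replaces A's split/join + nested index loop + scan of the growing result by a
-- character scan per path emitting the running prefix at each colon, then a staged
-- seen-set pass over the candidates (objective: alternative algorithm).

-- ===== PORT A =====
-- A-side helper: the marker string ":".join(parts[0:i]) + ":" + _MARKER_NAME
def pvMarker (parts : List String) (i : Int) : String :=
  PySem.Str.join ":" (PySem.List.slice parts (some 0) (some i)) ++ ":" ++ "__nullMarker"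

def with_null_markers (projection : List String) : List String :=
  projection.foldl
    (fun ret path =>
      let parts := ((PySem.Str.split? path ":").getD [])
      (PySem.List.pyRange 1 (parts.length : Int) 1).foldl
        (fun ret i =>
          let value := pvMarker parts i
          if ret.contains value then ret else ret ++ [value])
        ret)
    projection

-- ===== PORT B =====
-- B-side helper: _path_markers — scan the characters, emit prefix + ":" + _MARKER_NAME at each ':'
def pathMarkers (path : String) : List String :=
  (path.toList.foldl
    (fun (st : List String × String) ch =>
      if ch = ':' then (st.1 ++ [st.2 ++ ":" ++ "__nullMarker"], st.2.push ch)
      else (st.1, st.2.push ch))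
    ([], "")).1

def with_null_markers_alt (projection : List String) : List String :=
  let candidates := projection.flatMap pathMarkers
  (candidates.foldl
    (fun (st : PySem.Set String × List String) m =>
      if PySem.Set.contains st.1 m then st else (PySem.Set.add st.1 m, st.2 ++ [m]))
    (PySem.Set.ofList projection, projection)).2

-- ===== PRECONDITION & SPEC =====
def Spec_with_null_markers (projection : List String) (out : List String) : Prop := out = with_null_markers_alt projection
instance (projection : List String) (out : List String) : Decidable (Spec_with_null_markers projection out) := by unfold Spec_with_null_markers; infer_instance

-- ===== CLAIM (what is proved, stated in full; the proofs are below) =====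
def Claim_equal_with_null_markers : Prop := ∀ (projection : List String), Dom_with_null_markers projection → Spec_with_null_markers projection (with_null_markers projection)

-- ===== LEMMAS AND PROOFS =====

-- the colon-prefixes of a character list: one entry per ':' , in order
def cpfx : List Char → List (List Char)
  | [] => []
  | c :: rest => (if c = ':' then [[]] else []) ++ (cpfx rest).map (c :: ·)

-- PySem's splitOn on the one-char separator ":" is Mathlib's List.splitOn
theorem pv_go_spec (fuel : Nat) : ∀ (l cur : List Char) (acc : List (List Char)), l.length < fuel →
    PySem.Chars.splitOn.go [':'] fuel l cur acc
      = acc.reverse ++ List.modifyHead (fun q => cur.reverse ++ q) (l.splitOn ':') := by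
  induction fuel with
  | zero => intro l cur acc h; omega
  | succ fuel ih =>
    intro l cur acc h
    cases l with
    | nil => simp [PySem.Chars.splitOn.go, List.splitOn_nil]
    | cons c rest =>
      by_cases hc : c = ':'
      · subst hc
        rw [PySem.Chars.splitOn.go]
        simp only [List.isPrefixOf, List.length_cons] at *
        rw [if_pos (by simp)]
        rw [ih _ _ _ (by simp at h ⊢; omega)]
        have : (':' :: rest).splitOn ':' = [] :: rest.splitOn ':' := by
          show List.splitOnP _ _ = _
          rw [List.splitOnP_cons]
          simp
          rfl
        rw [this]
        obtain ⟨p, ps, hp⟩ : ∃ p ps, rest.splitOn ':' = p :: ps :=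
          List.exists_cons_of_ne_nil (List.splitOnP_ne_nil _ rest)
        simp [hp]
      · rw [PySem.Chars.splitOn.go]
        rw [if_neg (by simp [List.isPrefixOf]; intro h'; exact absurd h'.symm hc)]
        rw [ih _ _ _ (by simp at h ⊢; omega)]
        have : (c :: rest).splitOn ':' = List.modifyHead (c :: ·) (rest.splitOn ':') := by
          show List.splitOnP _ _ = _
          rw [List.splitOnP_cons]
          simp [hc]
          rfl
        rw [this]
        obtain ⟨p, ps, hp⟩ : ∃ p ps, rest.splitOn ':' = p :: ps :=
          List.exists_cons_of_ne_nil (List.splitOnP_ne_nil _ rest)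
        rw [hp]
        simp

theorem pv_splitOn_eq (cs : List Char) : PySem.Chars.splitOn cs [':'] = cs.splitOn ':' := by
  rw [PySem.Chars.splitOn, pv_go_spec _ _ _ _ (by omega)]
  obtain ⟨p, ps, hp⟩ : ∃ p ps, cs.splitOn ':' = p :: ps :=
    List.exists_cons_of_ne_nil (List.splitOnP_ne_nil _ cs)
  simp [hp]

theorem pv_inter_cons (c : Char) (p : List Char) (t : List (List Char)) :
    [':'].intercalate ((c :: p) :: t) = c :: [':'].intercalate (p :: t) := by
  cases t <;> simp [List.intercalate]

theorem pv_inter_nilcons (p : List Char) (t : List (List Char)) :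
    [':'].intercalate ([] :: p :: t) = ':' :: [':'].intercalate (p :: t) := by
  cases t <;> simp [List.intercalate]

-- A's join-of-first-i-parts markers, at the character level, are exactly the colon prefixes
theorem pv_interA (cs : List Char) :
    (List.range ((cs.splitOn ':').length - 1)).map
        (fun k => [':'].intercalate ((cs.splitOn ':').take (k+1)))
      = cpfx cs := by
  induction cs with
  | nil => simp [List.splitOn_nil, cpfx]
  | cons c rest ih =>
    obtain ⟨p, ps, hp⟩ : ∃ p ps, rest.splitOn ':' = p :: ps :=
      List.exists_cons_of_ne_nil (List.splitOnP_ne_nil _ rest)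
    by_cases hc : c = ':'
    · subst hc
      have hsp : (':' :: rest).splitOn ':' = [] :: rest.splitOn ':' := by
        show List.splitOnP _ _ = _
        rw [List.splitOnP_cons]; simp; rfl
      rw [hsp, hp]
      simp only [List.length_cons, Nat.add_sub_cancel, cpfx]
      rw [List.range_succ_eq_map]
      simp only [List.map_cons, List.map_map, if_true]
      have h0 : [':'].intercalate (List.take (0+1) ([] :: p :: ps)) = ([] : List Char) := by
        simp [List.intercalate]
      rw [h0, List.singleton_append]
      apply congrArg (List.cons ([] : List Char))
      rw [← ih, hp]
      simp only [List.length_cons, Nat.add_sub_cancel, List.map_map]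
      apply List.map_congr_left
      intro k hk
      simp only [Function.comp, Nat.succ_eq_add_one]
      rw [show k + 1 + 1 = (k+1) + 1 from rfl, List.take_cons (by omega), List.take_cons (by omega)]
      exact pv_inter_nilcons _ _
    · have hsp : (c :: rest).splitOn ':' = (c :: p) :: ps := by
        show List.splitOnP _ _ = _
        rw [List.splitOnP_cons]; simp [hc]
        show List.modifyHead _ (List.splitOn ':' rest) = _
        rw [hp]; simp
      rw [hsp]
      simp only [cpfx, if_neg hc, List.nil_append]
      rw [← ih, hp]
      simp only [List.length_cons, List.map_map]
      apply List.map_congr_left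
      intro k hk
      simp only [Function.comp]
      rw [List.take_cons (by omega), List.take_cons (by omega), pv_inter_cons]

-- B's pathMarkers, computed over the colon prefixes (accumulator generalized)
theorem pv_bfold (l : List Char) : ∀ (out : List String) (pre : String),
    (l.foldl
      (fun (st : List String × String) ch =>
        if ch = ':' then (st.1 ++ [st.2 ++ ":" ++ "__nullMarker"], st.2.push ch)
        else (st.1, st.2.push ch))
      (out, pre)).1
    = out ++ (cpfx l).map
        (fun p => String.ofList (pre.toList ++ p ++ ':' :: "__nullMarker".toList)) := by
  induction l with
  | nil => intro out pre; simp [cpfx]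
  | cons c rest ih =>
    intro out pre
    by_cases hc : c = ':'
    · subst hc
      simp only [List.foldl_cons]
      rw [ih]
      simp [cpfx]
      constructor
      · apply String.toList_inj.mp; simp
      · intro a _; apply String.toList_inj.mp; simp
    · simp only [List.foldl_cons, if_neg hc]
      rw [ih]
      simp [cpfx, hc]
      intro a _; apply String.toList_inj.mp; simp

theorem pv_bfold_path (path : String) :
    pathMarkers path
      = (cpfx path.toList).map (fun p => String.ofList (p ++ ':' :: "__nullMarker".toList)) := by
  rw [pathMarkers, pv_bfold]
  simp

-- A's per-path marker list equals B's pathMarkers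
theorem pv_pathA_eq (path : String) :
    (PySem.List.pyRange 1 ((((PySem.Str.split? path ":").getD []).length : Int)) 1).map
        (fun i => pvMarker ((PySem.Str.split? path ":").getD []) i)
      = pathMarkers path := by
  have hsplit : (PySem.Str.split? path ":").getD []
      = (path.toList.splitOn ':').map String.ofList := by
    simp [PySem.Str.split?, PySem.Chars.split?, pv_splitOn_eq]
  rw [hsplit, pv_bfold_path, ← pv_interA]
  rw [PySem.List.pyRange_one]
  have hn : (((path.toList.splitOn ':').map String.ofList).length : Int) - 1
      = (((path.toList.splitOn ':').length - 1 : Nat) : Int) := by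
    have : (path.toList.splitOn ':').length ≠ 0 := by
      simpa using List.splitOnP_ne_nil (· == ':') path.toList
    simp
    omega
  rw [hn, Int.toNat_natCast, List.map_map, List.map_map]
  apply List.map_congr_left
  intro k hk
  simp only [Function.comp]
  apply String.toList_inj.mp
  have hsl : PySem.List.slice ((path.toList.splitOn ':').map String.ofList) (some 0) (some (1 + (k:Int)))
      = ((path.toList.splitOn ':').map String.ofList).take (k+1) := by
    have h0 : (0 : Int) = ((0 : Nat) : Int) := rfl
    have h1 : (1 + (k:Int)) = (((k+1 : Nat)) : Int) := by push_cast; ring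
    rw [h0, h1, PySem.List.slice_natCast]
    simp
  rw [pvMarker, hsl]
  simp [PySem.Str.toList_join, PySem.Chars.join, List.map_take, List.map_map]
  simp [Function.comp_def]

-- flatten the nested loop: folding the inner lists one after another
theorem pv_foldl_flatMap {α β : Type} (f : List β → α → List β) (g : α → List α)
    (l : List α) (init : List β) :
    (l.flatMap g).foldl (fun a x => f a x) init
      = l.foldl (fun a x => (g x).foldl f a) init := by
  induction l generalizing init with
  | nil => rfl
  | cons x xs ih => simp [List.flatMap_cons, List.foldl_append, ih]

-- B's seen-set fold is A's append-if-absent fold, under the invariant seen ≈ out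
theorem pv_seen_fold (c : List String) : ∀ (seen : PySem.Set String) (out : List String),
    (∀ x : String, seen.contains x = out.contains x) →
    (c.foldl
        (fun (st : PySem.Set String × List String) m =>
          if PySem.Set.contains st.1 m then st else (PySem.Set.add st.1 m, st.2 ++ [m]))
        (seen, out)).2
      = c.foldl (fun ret v => if ret.contains v then ret else ret ++ [v]) out := by
  induction c with
  | nil => intro seen out h; rfl
  | cons m cs ih =>
    intro seen out h
    simp only [List.foldl_cons]
    have hc : PySem.Set.contains seen m = out.contains m := by
      simpa [PySem.Set.contains] using h m
    by_cases hm : out.contains m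
    · rw [if_pos (by rw [hc]; exact hm), if_pos hm]
      exact ih seen out h
    · rw [if_neg (by rw [hc]; simpa using hm), if_neg (by simpa using hm)]
      have hseen : m ∉ seen := by
        have h2 : seen.contains m = false := by
          rw [h m]; simpa using hm
        simpa using h2
      have hinv : ∀ x : String, (PySem.Set.add seen m).contains x = (out ++ [m]).contains x := by
        intro x
        rw [PySem.Set.add_of_not_mem hseen]
        have hx := h x
        simp only [PySem.Set.contains_eq_listContains, List.contains_eq_mem,
          List.mem_append, List.mem_singleton] at hx ⊢
        rw [decide_eq_decide] at hx ⊢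
        tauto
      exact ih _ _ hinv

-- ===== VERDICT (by name: the statement is the Claim_ definition above) =====
theorem with_null_markers_spec : Claim_equal_with_null_markers := by
  intro projection _
  unfold Spec_with_null_markers with_null_markers with_null_markers_alt
  have hA : (fun (ret : List String) (path : String) =>
        (PySem.List.pyRange 1 ((((PySem.Str.split? path ":").getD []).length : Int)) 1).foldl
          (fun ret i =>
            let value := pvMarker ((PySem.Str.split? path ":").getD []) i
            if ret.contains value then ret else ret ++ [value]) ret)
      = (fun (ret : List String) (path : String) =>
        (pathMarkers path).foldl
          (fun ret v => if ret.contains v then ret else ret ++ [v]) ret) := by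
    funext ret path
    rw [← pv_pathA_eq, List.foldl_map]
  rw [hA, ← pv_foldl_flatMap
        (fun ret v => if ret.contains v then ret else ret ++ [v])
        pathMarkers projection projection]
  rw [pv_seen_fold]
  intro x
  by_cases hx : x ∈ projection <;>
    simp [PySem.Set.contains_eq_listContains, List.contains_eq_mem, PySem.Set.mem_ofList, hx]
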